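-- pv_equiv track=rewrite | github.com/KrozFu/project-algorithms | tests/p-testing/Final.py | EstadoCanalFuturo
-- ===== SOURCE A (Python) =====
-- def EstadoCanalFuturo(matriz,numEstSig,casos):
--     #limpiar_pantalla()
--     matriztransp=list(map(list, zip(*matriz)))
--     totalCanales=[[0] * len(casos[0]) for asd in range(len(casos))] #Crea otra matriz para almacenar las coincidencias con el caso siguiente
--     totalCoincidencias=[[0]*len(casos[0]) for asd in range(len(casos))] #Crea otra matriz para almacenar el numero de veces que esta la muestra en la matriz de casos base
--
--     #Ciclo for para almacenar los valores en las respectivas matrices creadas anteriormente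
--     for c in range(len(casos)):
--         for i in range(len(matriztransp)):
--             if matriztransp[i] == casos[c] and i + numEstSig < len(matriztransp): #Verifica coincidencias entre el caso base seleccionado y la matriz principal
--                 for x in range(len(casos[c])):
--                     totalCoincidencias[c][x]+=1
--                     if(matriztransp[-1]==casos[c]):
--                         totalCoincidencias[c][x]+=1
--                     if matriztransp[i + numEstSig][x] == 1: #Contador, si el valor que hay en el estado anterior cada n veces es = a 1
--                         totalCanales[c][x] += 1
--
--     return totalCanales, totalCoincidencias
-- ===== SOURCE B (Python) =====
-- def EstadoCanalFuturo(matriz, numEstSig, casos):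
--     # Hash-index the transposed columns by value; each caso then needs a single
--     # dict lookup to find its matching positions, instead of rescanning the matrix.
--     transp = [list(col) for col in zip(*matriz)]
--     T = len(transp)
--     index = {}
--     for i, row in enumerate(transp):
--         index.setdefault(tuple(row), []).append(i)
--     W = len(casos[0]) if casos else 0
--     canales = []
--     coincidencias = []
--     for caso in casos:
--         pos = [i for i in index.get(tuple(caso), []) if i + numEstSig < T]
--         k = len(caso)
--         crow = [len(pos) if x < k else 0 for x in range(W)]
--         krow = [0] * W
--         for i in pos:
--             fut = transp[i + numEstSig]
--             for x in range(k):
--                 if fut[x] == 1: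
--                     krow[x] += 1
--         canales.append(krow)
--         coincidencias.append(crow)
--     return canales, coincidencias
-- ===== Notes on version B (the rewrite author's own statement) =====
-- stated objective: alternative
-- what changed: B hash-indexes the transposed columns by value so each caso is resolved with one dict lookup and a scan of only its matching positions, and fills the coincidence row with a comprehension, instead of A's per-caso rescan of all columns with in-place increments; Pre_ excludes only inputs where A raises IndexError (a matching column longer than casos[0], or a future index below -len(transpose)).
-- intended difference: On inputs where the last transposed column equals some non-empty caso that also has a match with a valid future index, A returns twice the match count in that caso's coincidence row (an extra increment fires once per cell inside the x-loop), while B returns the match count itself, which is the intended coincidence count. — e.g. on EstadoCanalFuturo([[1, 0, 0], [1, 0, 0]], 1, [[0, 0]]): A returns ([[0, 0]], [[2, 2]]), B returns ([[0, 0]], [[1, 1]])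
import Mathlib
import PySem

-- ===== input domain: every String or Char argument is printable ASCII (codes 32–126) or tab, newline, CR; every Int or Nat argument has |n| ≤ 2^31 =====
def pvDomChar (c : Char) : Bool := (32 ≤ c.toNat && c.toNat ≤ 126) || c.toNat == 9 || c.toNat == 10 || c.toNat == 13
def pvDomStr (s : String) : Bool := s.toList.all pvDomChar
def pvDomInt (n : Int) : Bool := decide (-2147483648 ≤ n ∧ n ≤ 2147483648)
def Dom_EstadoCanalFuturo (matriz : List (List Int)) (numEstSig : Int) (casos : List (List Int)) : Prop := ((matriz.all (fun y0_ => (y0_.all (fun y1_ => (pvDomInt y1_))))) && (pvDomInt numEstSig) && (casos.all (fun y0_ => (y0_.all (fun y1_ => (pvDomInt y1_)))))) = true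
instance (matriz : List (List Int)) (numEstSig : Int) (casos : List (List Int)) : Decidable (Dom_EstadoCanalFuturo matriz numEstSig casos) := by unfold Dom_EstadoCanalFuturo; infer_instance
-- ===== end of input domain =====

-- B replaces A's per-caso rescan of all transposed columns by a hash index of the columns
-- (one dict lookup per caso) and a direct fill of the coincidence row; objective: alternative.
-- On D_ below A double-counts a coincidence row and B returns the plain match count.

-- ===== PORT A =====
-- list(map(list, zip(*matriz))): columns of `matriz`, truncated to the shortest row
-- (both Pythons compute this identically; fuel = length of the first row)
def pyTransposeGo : Nat → List (List Int) → List (List Int)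
  | 0, _ => []
  | fuel + 1, m =>
    if m = [] then []
    else if m.any List.isEmpty then []
    else (m.map (fun t => t.headD 0)) :: pyTransposeGo fuel (m.map List.tail)

def pyTranspose (m : List (List Int)) : List (List Int) :=
  pyTransposeGo (m.headD []).length m

def EstadoCanalFuturo (matriz : List (List Int)) (numEstSig : Int) (casos : List (List Int)) : List (List Int) × List (List Int) :=
  let matriztransp := pyTranspose matriz
  let totalCanales := List.replicate casos.length (List.replicate (casos.headD []).length (0 : Int))
  let totalCoincidencias := List.replicate casos.length (List.replicate (casos.headD []).length (0 : Int))
  (List.range casos.length).foldl (fun (st : List (List Int) × List (List Int)) (c : Nat) =>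
      (List.range matriztransp.length).foldl (fun (st : List (List Int) × List (List Int)) (i : Nat) =>
        if (PySem.List.pyGetD matriztransp (i : Int) [] == casos.getD c []) &&
           decide ((i : Int) + numEstSig < (matriztransp.length : Int)) then
          (List.range (casos.getD c []).length).foldl (fun (st : List (List Int) × List (List Int)) (x : Nat) =>
            let co := st.2.modify c (fun row => row.modify x (· + 1))
            let co := if PySem.List.pyGetD matriztransp (-1) [] == casos.getD c []
                      then co.modify c (fun row => row.modify x (· + 1)) else co
            let ca := if (PySem.List.pyGetD matriztransp ((i : Int) + numEstSig) []).getD x 0 == (1 : Int)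
                      then st.1.modify c (fun row => row.modify x (· + 1)) else st.1
            (ca, co)) st
        else st) st)
    (totalCanales, totalCoincidencias)


-- ===== PORT B =====
def EstadoCanalFuturo_alt (matriz : List (List Int)) (numEstSig : Int) (casos : List (List Int)) : List (List Int) × List (List Int) :=
  let transp := pyTranspose matriz
  let T := transp.length
  let index := (PySem.List.enumerate transp).foldl
      (fun (d : PySem.Dict (List Int) (List Int)) p => d.modify p.2 [] (· ++ [p.1])) PySem.Dict.empty
  let W := (casos.headD []).length
  casos.foldl (fun (acc : List (List Int) × List (List Int)) caso =>
      let pos := (index.getD caso []).filter (fun i => decide (i + numEstSig < (T : Int)))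
      let k := caso.length
      let crow := (List.range W).map (fun x => if x < k then (pos.length : Int) else 0)
      let krow := pos.foldl (fun r i =>
          let fut := PySem.List.pyGetD transp (i + numEstSig) []
          (List.range k).foldl (fun r (x : Nat) =>
            if fut.getD x 0 == (1 : Int) then r.modify x (· + 1) else r) r)
        (List.replicate W (0 : Int))
      (acc.1 ++ [krow], acc.2 ++ [crow]))
    ([], [])


-- ===== PRECONDITION & SPEC =====
-- closed-form shape helpers for Pre_/D_: the transposed matrix has pvMinLen matriz columns
-- (Python's zip(*matriz) truncates to the shortest row) and its column i is pvCol matriz i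
def pvMinLen (m : List (List Int)) : Nat :=
  m.foldr (fun r t => min r.length t) (m.headD []).length

def pvCol (m : List (List Int)) (i : Nat) : List Int :=
  m.map (fun r => r.getD i 0)

-- Pre_ excludes exactly the inputs on which the Python A raises IndexError: a matching
-- column longer than casos[0] (write past the row ends), or a future index i+numEstSig
-- below -len(transpose) (negative index out of range); Python B raises on the same inputs.
def Pre_EstadoCanalFuturo (matriz : List (List Int)) (numEstSig : Int) (casos : List (List Int)) : Prop :=
  ∀ caso ∈ casos, ∀ i ∈ List.range (pvMinLen matriz),
    pvCol matriz i = caso →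
    (i : Int) + numEstSig < ((pvMinLen matriz : Nat) : Int) →
    (caso.length ≤ (casos.headD []).length ∧ 0 ≤ (i : Int) + numEstSig + ((pvMinLen matriz : Nat) : Int))
instance (matriz : List (List Int)) (numEstSig : Int) (casos : List (List Int)) : Decidable (Pre_EstadoCanalFuturo matriz numEstSig casos) := by unfold Pre_EstadoCanalFuturo; infer_instance

def pvWitness_EstadoCanalFuturo : List (List Int) × Int × List (List Int) := ([[1, 0], [1, 1]], 1, [[1, 1]])

-- On inputs where the last transposed column equals some non-empty caso that also has a match with a
-- valid future index, A returns twice the match count in that caso's coincidence row (an extra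
-- increment fires once per cell inside the x-loop), while B returns the match count itself,
-- which is the intended coincidence count.
def D_EstadoCanalFuturo (matriz : List (List Int)) (numEstSig : Int) (casos : List (List Int)) : Prop :=
  ∃ caso ∈ casos, caso ≠ [] ∧ 0 < pvMinLen matriz ∧
    pvCol matriz (pvMinLen matriz - 1) = caso ∧
    ∃ i ∈ List.range (pvMinLen matriz), pvCol matriz i = caso ∧
      (i : Int) + numEstSig < ((pvMinLen matriz : Nat) : Int)
instance (matriz : List (List Int)) (numEstSig : Int) (casos : List (List Int)) : Decidable (D_EstadoCanalFuturo matriz numEstSig casos) := by unfold D_EstadoCanalFuturo; infer_instance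

def Spec_EstadoCanalFuturo (matriz : List (List Int)) (numEstSig : Int) (casos : List (List Int)) (out : List (List Int) × List (List Int)) : Prop := ¬ D_EstadoCanalFuturo matriz numEstSig casos → out = EstadoCanalFuturo_alt matriz numEstSig casos
instance (matriz : List (List Int)) (numEstSig : Int) (casos : List (List Int)) (out : List (List Int) × List (List Int)) : Decidable (Spec_EstadoCanalFuturo matriz numEstSig casos out) := by unfold Spec_EstadoCanalFuturo; infer_instance

def pvDiffWitness_EstadoCanalFuturo : List (List Int) × Int × List (List Int) := ([[1, 0, 0], [1, 0, 0]], 1, [[0, 0]])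
def pvDiffWitnessOut_EstadoCanalFuturo : (List (List Int) × List (List Int)) × (List (List Int) × List (List Int)) :=
  (([[0, 0]], [[2, 2]]), ([[0, 0]], [[1, 1]]))

-- ===== CLAIM (what is proved, stated in full; the proofs are below) =====
def Claim_unchanged_EstadoCanalFuturo : Prop := ∀ (matriz : List (List Int)) (numEstSig : Int) (casos : List (List Int)), Dom_EstadoCanalFuturo matriz numEstSig casos → Pre_EstadoCanalFuturo matriz numEstSig casos → Spec_EstadoCanalFuturo matriz numEstSig casos (EstadoCanalFuturo matriz numEstSig casos)
def Claim_changed_EstadoCanalFuturo : Prop := Dom_EstadoCanalFuturo (pvDiffWitness_EstadoCanalFuturo.1) (pvDiffWitness_EstadoCanalFuturo.2.1) (pvDiffWitness_EstadoCanalFuturo.2.2) ∧ Pre_EstadoCanalFuturo (pvDiffWitness_EstadoCanalFuturo.1) (pvDiffWitness_EstadoCanalFuturo.2.1) (pvDiffWitness_EstadoCanalFuturo.2.2) ∧ D_EstadoCanalFuturo (pvDiffWitness_EstadoCanalFuturo.1) (pvDiffWitness_EstadoCanalFuturo.2.1) (pvDiffWitness_EstadoCanalFuturo.2.2) ∧ EstadoCanalFuturo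 (pvDiffWitness_EstadoCanalFuturo.1) (pvDiffWitness_EstadoCanalFuturo.2.1) (pvDiffWitness_EstadoCanalFuturo.2.2) = pvDiffWitnessOut_EstadoCanalFuturo.1 ∧ EstadoCanalFuturo_alt (pvDiffWitness_EstadoCanalFuturo.1) (pvDiffWitness_EstadoCanalFuturo.2.1) (pvDiffWitness_EstadoCanalFuturo.2.2) = pvDiffWitnessOut_EstadoCanalFuturo.2 ∧ pvDiffWitnessOut_EstadoCanalFuturo.1 ≠ pvDiffWitnessOut_EstadoCanalFuturo.2
def Claim_exact_EstadoCanalFuturo : Prop := ∀ (matriz : List (List Int)) (numEstSig : Int) (casos : List (List Int)), Dom_EstadoCanalFuturo matriz numEstSig casos → Pre_EstadoCanalFuturo matriz numEstSig casos → D_EstadoCanalFuturo matriz numEstSig casos → EstadoCanalFuturo matriz numEstSig casos ≠ EstadoCanalFuturo_alt matriz numEstSig casos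

-- ===== LEMMAS AND PROOFS =====
def pvGuard (transp : List (List Int)) (num : Int) (caso : List Int) (i : Nat) : Bool :=
  (PySem.List.pyGetD transp (i : Int) [] == caso) && decide ((i : Int) + num < (transp.length : Int))

def pvStepK (transp : List (List Int)) (num : Int) (i : Int) (r : List Int) (x : Nat) : List Int :=
  if (PySem.List.pyGetD transp (i + num) []).getD x 0 == (1 : Int) then r.modify x (· + 1) else r

def pvStepC (lastm : Bool) (r : List Int) (x : Nat) : List Int :=
  let r1 := r.modify x (· + 1)
  if lastm then r1.modify x (· + 1) else r1

def pvRowK (transp : List (List Int)) (num : Int) (caso : List Int) (r : List Int) : List Int :=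
  (List.range transp.length).foldl (fun r i =>
    if pvGuard transp num caso i then (List.range caso.length).foldl (pvStepK transp num (i : Int)) r else r) r

def pvRowC (transp : List (List Int)) (num : Int) (caso : List Int) (r : List Int) : List Int :=
  (List.range transp.length).foldl (fun r i =>
    if pvGuard transp num caso i then
      (List.range caso.length).foldl (pvStepC (PySem.List.pyGetD transp (-1) [] == caso)) r
    else r) r

theorem pv_modify_rfl {α : Type} (M : List α) (c : Nat) : M.modify c (fun r => r) = M := by
  apply List.ext_getElem?
  intro j
  simp only [List.getElem?_modify]
  split <;> cases M[j]? <;> simp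

theorem pv_modify_modify {α : Type} (l : List α) (i : Nat) (f g : α → α) :
    (l.modify i f).modify i g = l.modify i (fun x => g (f x)) := by
  apply List.ext_getElem?
  intro j
  simp only [List.getElem?_modify]
  cases l[j]? <;> simp <;> split <;> simp

theorem pv_foldl_modify {α β : Type} (l : List β) (c : Nat) (g : α → β → α) (M : List α) :
    l.foldl (fun M y => M.modify c (fun r => g r y)) M = M.modify c (fun r => l.foldl g r) := by
  induction l generalizing M with
  | nil => simpa using (pv_modify_rfl M c).symm
  | cons y ys ih => simp only [List.foldl_cons, ih, pv_modify_modify]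

theorem pv_modify_append_left {α : Type} (M : List α) (z : α) (c : Nat) (hc : c < M.length) (g : α → α) :
    (M ++ [z]).modify c g = (M.modify c g) ++ [z] := by
  apply List.ext_getElem?
  intro j
  simp only [List.getElem?_modify, List.getElem?_append, List.length_modify]
  by_cases hcj : c = j
  · subst hcj
    simp [hc]
  · simp [hcj]

theorem pv_modify_append_length {α : Type} (M : List α) (z : α) (g : α → α) (c : Nat) (hc : c = M.length) :
    (M ++ [z]).modify c g = M ++ [g z] := by
  subst hc
  apply List.ext_getElem?
  intro j
  rcases lt_trichotomy j M.length with hj | hj | hj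
  · simp [List.getElem?_append, hj, Nat.ne_of_gt hj]
  · subst hj
    simp [List.getElem?_modify]
  · have h1 : ¬ j < M.length := by omega
    have h2 : M.length ≠ j := by omega
    have h3 : (1:Nat) ≤ j - M.length := by omega
    simp [List.getElem?_modify, List.getElem?_append, h1, h2,
      List.getElem?_eq_none (l := [z]) (by simpa using h3),
      List.getElem?_eq_none (l := [g z]) (by simpa using h3)]

theorem pv_foldl_modify_snoc (l : List Nat) (f : Nat → List Int → List Int) (M : List (List Int)) (z : List Int)
    (hl : ∀ c ∈ l, c < M.length) :
    l.foldl (fun M c => M.modify c (f c)) (M ++ [z]) = (l.foldl (fun M c => M.modify c (f c)) M) ++ [z] := by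
  induction l generalizing M with
  | nil => rfl
  | cons y ys ih =>
    have hy : y < M.length := hl y (by simp)
    simp only [List.foldl_cons, pv_modify_append_left M z y hy]
    exact ih (M.modify y (f y)) (by intro c hc; simpa [List.length_modify] using hl c (by simp [hc]))

theorem pv_foldl_range_modify (n : Nat) (f : Nat → List Int → List Int) (r0 : List Int) :
    (List.range n).foldl (fun M c => M.modify c (f c)) (List.replicate n r0) =
      (List.range n).map (fun c => f c r0) := by
  induction n with
  | zero => rfl
  | succ n ih =>
    have hrep : List.replicate (n + 1) r0 = List.replicate n r0 ++ [r0] := by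
      simp [List.replicate_succ']
    rw [List.range_succ, hrep, List.foldl_append]
    rw [pv_foldl_modify_snoc _ _ _ _ (by intro c hc; simpa [List.length_replicate] using List.mem_range.mp hc)]
    rw [ih]
    simp only [List.foldl_cons, List.foldl_nil]
    have hlen : ((List.range n).map (fun c => f c r0)).length = n := by simp
    rw [pv_modify_append_length _ _ _ _ hlen.symm, List.map_append]
    simp

theorem pv_if_modify_pair {α : Type} (b : Bool) (M1 M2 : List α) (c : Nat) (F G : α → α) :
    (if b = true then (M1.modify c F, M2.modify c G) else (M1, M2)) =
      (M1.modify c (fun r => if b = true then F r else r),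
       M2.modify c (fun r => if b = true then G r else r)) := by
  cases b
  · simp [pv_modify_rfl]
  · simp

theorem pv_A_eq (matriz : List (List Int)) (numEstSig : Int) (casos : List (List Int)) :
    EstadoCanalFuturo matriz numEstSig casos =
      (casos.map (fun caso => pvRowK (pyTranspose matriz) numEstSig caso
          (List.replicate (casos.headD []).length (0 : Int))),
       casos.map (fun caso => pvRowC (pyTranspose matriz) numEstSig caso
          (List.replicate (casos.headD []).length (0 : Int)))) := by
  unfold EstadoCanalFuturo
  dsimp only
  set transp := pyTranspose matriz with htr
  set W := (casos.headD []).length with hW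
  have hxbody : ∀ (c i : Nat),
      (fun (st : List (List Int) × List (List Int)) (x : Nat) =>
        ((if ((PySem.List.pyGetD transp ((i : Int) + numEstSig) []).getD x 0 == (1 : Int)) = true then
            st.1.modify c fun row => row.modify x (· + 1)
          else st.1),
         (if (PySem.List.pyGetD transp (-1) [] == casos.getD c []) = true then
            (st.2.modify c fun row => row.modify x (· + 1)).modify c fun row => row.modify x (· + 1)
          else st.2.modify c fun row => row.modify x (· + 1)))) =
      (fun (st : List (List Int) × List (List Int)) (x : Nat) =>
        (st.1.modify c (fun r => pvStepK transp numEstSig (i : Int) r x),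
         st.2.modify c (fun r => pvStepC (PySem.List.pyGetD transp (-1) [] == casos.getD c []) r x))) := by
    intro c i
    funext st x
    cases hb : (PySem.List.pyGetD transp ((i : Int) + numEstSig) []).getD x 0 == (1 : Int) <;>
    cases hl : PySem.List.pyGetD transp (-1) [] == casos.getD c [] <;>
      simp only [pvStepK, pvStepC, hb, hl, Bool.false_eq_true, if_true, if_false,
        pv_modify_modify, pv_modify_rfl]
  have hibody : ∀ (c : Nat),
      (fun (st : List (List Int) × List (List Int)) (i : Nat) =>
        if ((PySem.List.pyGetD transp (i : Int) [] == casos.getD c []) &&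
           decide ((i : Int) + numEstSig < (transp.length : Int))) = true then
          (List.range (casos.getD c []).length).foldl (fun (st : List (List Int) × List (List Int)) (x : Nat) =>
            ((if ((PySem.List.pyGetD transp ((i : Int) + numEstSig) []).getD x 0 == (1 : Int)) = true then
                st.1.modify c fun row => row.modify x (· + 1)
              else st.1),
             (if (PySem.List.pyGetD transp (-1) [] == casos.getD c []) = true then
                (st.2.modify c fun row => row.modify x (· + 1)).modify c fun row => row.modify x (· + 1)
              else st.2.modify c fun row => row.modify x (· + 1)))) st
        else st) =
      (fun (st : List (List Int) × List (List Int)) (i : Nat) =>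
        (st.1.modify c (fun r => if pvGuard transp numEstSig (casos.getD c []) i then
            (List.range (casos.getD c []).length).foldl (pvStepK transp numEstSig (i : Int)) r else r),
         st.2.modify c (fun r => if pvGuard transp numEstSig (casos.getD c []) i then
            (List.range (casos.getD c []).length).foldl
              (pvStepC (PySem.List.pyGetD transp (-1) [] == casos.getD c [])) r else r))) := by
    intro c
    funext st i
    rw [hxbody c i]
    obtain ⟨M1, M2⟩ := st
    rw [PySem.List.foldl_prod_mk
      (f := fun (a : List (List Int)) (x : Nat) => a.modify c fun r => pvStepK transp numEstSig (i : Int) r x)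
      (g := fun (a : List (List Int)) (x : Nat) =>
        a.modify c fun r => pvStepC (PySem.List.pyGetD transp (-1) [] == casos.getD c []) r x)]
    simp only [pv_foldl_modify, pvGuard]
    exact pv_if_modify_pair _ _ _ _ _ _
  rw [show (fun (st : List (List Int) × List (List Int)) (c : Nat) =>
        (List.range transp.length).foldl (fun (st : List (List Int) × List (List Int)) (i : Nat) =>
          if ((PySem.List.pyGetD transp (i : Int) [] == casos.getD c []) &&
             decide ((i : Int) + numEstSig < (transp.length : Int))) = true then
            (List.range (casos.getD c []).length).foldl (fun (st : List (List Int) × List (List Int)) (x : Nat) =>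
              ((if ((PySem.List.pyGetD transp ((i : Int) + numEstSig) []).getD x 0 == (1 : Int)) = true then
                  st.1.modify c fun row => row.modify x (· + 1)
                else st.1),
               (if (PySem.List.pyGetD transp (-1) [] == casos.getD c []) = true then
                  (st.2.modify c fun row => row.modify x (· + 1)).modify c fun row => row.modify x (· + 1)
                else st.2.modify c fun row => row.modify x (· + 1)))) st
          else st) st) =
      (fun (st : List (List Int) × List (List Int)) (c : Nat) =>
        (st.1.modify c (fun r => pvRowK transp numEstSig (casos.getD c []) r),
         st.2.modify c (fun r => pvRowC transp numEstSig (casos.getD c []) r))) from by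
    funext st c
    rw [hibody c]
    obtain ⟨M1, M2⟩ := st
    rw [PySem.List.foldl_prod_mk
      (f := fun (a : List (List Int)) (i : Nat) => a.modify c fun r =>
        if pvGuard transp numEstSig (casos.getD c []) i then
          (List.range (casos.getD c []).length).foldl (pvStepK transp numEstSig (i : Int)) r else r)
      (g := fun (a : List (List Int)) (i : Nat) => a.modify c fun r =>
        if pvGuard transp numEstSig (casos.getD c []) i then
          (List.range (casos.getD c []).length).foldl
            (pvStepC (PySem.List.pyGetD transp (-1) [] == casos.getD c [])) r else r)]
    simp only [pv_foldl_modify]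
    rfl]
  rw [PySem.List.foldl_prod_mk
    (f := fun (a : List (List Int)) (c : Nat) => a.modify c fun r => pvRowK transp numEstSig (casos.getD c []) r)
    (g := fun (a : List (List Int)) (c : Nat) => a.modify c fun r => pvRowC transp numEstSig (casos.getD c []) r)]
  simp only [pv_foldl_range_modify]
  have hmapr : ∀ (F : List Int → List Int),
      (List.range casos.length).map (fun c => F (casos.getD c [])) = casos.map F := by
    intro F
    apply List.ext_getElem
    · simp
    · intro j h1 h2
      have h1' : j < casos.length := by simpa using h1
      simp [List.getElem?_eq_getElem h1']
  rw [hmapr (fun caso => pvRowK transp numEstSig caso (List.replicate W 0)),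
    hmapr (fun caso => pvRowC transp numEstSig caso (List.replicate W 0))]

def pvPos (transp : List (List Int)) (num : Int) (caso : List Int) : List Nat :=
  (List.range transp.length).filter (pvGuard transp num caso)

def pvCrowB (transp : List (List Int)) (num : Int) (caso : List Int) (W : Nat) : List Int :=
  (List.range W).map (fun x => if x < caso.length then ((pvPos transp num caso).length : Int) else 0)

theorem pv_swap_filter (e : List (Int × List Int)) (caso : List Int) :
    ((e.map (fun p => (p.2, p.1))).filter (fun q => q.1 == caso)).map (·.2) =
      (e.filter (fun p => p.2 == caso)).map (·.1) := by
  simp [List.filter_map, List.map_map, Function.comp_def]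

theorem pv_enum_filter (l : List (List Int)) (caso : List Int) (s : Int) :
    ((PySem.List.enumerate l s).filter (fun p => p.2 == caso)).map (·.1) =
      ((List.range l.length).filter (fun k => l.getD k [] == caso)).map (fun (k : Nat) => s + (k : Int)) := by
  induction l generalizing s with
  | nil => simp [PySem.List.enumerate]
  | cons r tl ih =>
    rw [PySem.List.enumerate_cons, List.length_cons, List.range_succ_eq_map]
    rw [List.filter_cons, List.filter_cons]
    simp only [List.getD_cons_zero]
    have htail : List.filter (fun k => (r :: tl).getD k [] == caso) (List.map Nat.succ (List.range tl.length)) =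
        List.map Nat.succ (List.filter (fun k => tl.getD k [] == caso) (List.range tl.length)) := by
      rw [List.filter_map]
      congr 1
    cases h : r == caso
    · simp only [h, Bool.false_eq_true, if_false, htail]
      rw [ih (s + 1), List.map_map]
      apply List.map_congr_left
      intro k hk
      simp only [Function.comp_apply, Nat.succ_eq_add_one]
      push_cast
      ring
    · simp only [h, if_true, htail, List.map_cons]
      rw [ih (s + 1), List.map_map]
      congr 1
      · simp
      apply List.map_congr_left
      intro k hk
      simp only [Function.comp_apply, Nat.succ_eq_add_one]
      push_cast
      ring

theorem pv_pos_eq (matriz : List (List Int)) (numEstSig : Int) (caso : List Int) :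
    (((PySem.List.enumerate (pyTranspose matriz)).foldl
        (fun (d : PySem.Dict (List Int) (List Int)) p => d.modify p.2 [] (· ++ [p.1]))
        PySem.Dict.empty).getD caso []).filter
          (fun i => decide (i + numEstSig < ((pyTranspose matriz).length : Int))) =
      (pvPos (pyTranspose matriz) numEstSig caso).map (fun (k : Nat) => (k : Int)) := by
  set transp := pyTranspose matriz with htr
  have hswap : (PySem.List.enumerate transp).foldl
      (fun (d : PySem.Dict (List Int) (List Int)) p => d.modify p.2 [] (· ++ [p.1])) PySem.Dict.empty =
      ((PySem.List.enumerate transp).map (fun p => (p.2, p.1))).foldl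
        (fun (d : PySem.Dict (List Int) (List Int)) q => d.modify q.1 [] (· ++ [q.2])) PySem.Dict.empty := by
    rw [List.foldl_map]
  rw [hswap, PySem.Dict.getD_foldl_modify_append]
  rw [PySem.Dict.getD_empty, List.nil_append, pv_swap_filter, pv_enum_filter transp caso 0]
  simp only [zero_add]
  rw [List.filter_map, List.filter_filter]
  unfold pvPos
  congr 1
  apply List.filter_congr
  intro k hk
  simp [pvGuard, Bool.and_comm, Function.comp, PySem.List.pyGetD_natCast]

theorem pv_rowK_eq (transp : List (List Int)) (num : Int) (caso : List Int) (r : List Int) :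
    ((pvPos transp num caso).map (fun (k : Nat) => (k : Int))).foldl
      (fun r i => (List.range caso.length).foldl (pvStepK transp num i) r) r =
    pvRowK transp num caso r := by
  rw [List.foldl_map]
  unfold pvRowK pvPos
  rw [List.foldl_filter]

theorem pv_B_eq (matriz : List (List Int)) (numEstSig : Int) (casos : List (List Int)) :
    EstadoCanalFuturo_alt matriz numEstSig casos =
      (casos.map (fun caso => pvRowK (pyTranspose matriz) numEstSig caso
          (List.replicate (casos.headD []).length (0 : Int))),
       casos.map (fun caso => pvCrowB (pyTranspose matriz) numEstSig caso (casos.headD []).length)) := by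
  unfold EstadoCanalFuturo_alt
  dsimp only
  rw [PySem.List.foldl_prod_mk
    (f := fun (a : List (List Int)) (caso : List Int) => a ++
      [List.foldl (fun r i =>
          List.foldl (fun r (x : Nat) =>
              if ((PySem.List.pyGetD (pyTranspose matriz) (i + numEstSig) []).getD x 0 == (1 : Int)) = true then
                r.modify x (· + 1)
              else r)
            r (List.range caso.length))
        (List.replicate (casos.headD []).length (0 : Int))
        (List.filter (fun i => decide (i + numEstSig < ((pyTranspose matriz).length : Int)))
          ((List.foldl (fun (d : PySem.Dict (List Int) (List Int)) p => d.modify p.2 [] (· ++ [p.1]))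
                PySem.Dict.empty (PySem.List.enumerate (pyTranspose matriz))).getD caso []))])
    (g := fun (a : List (List Int)) (caso : List Int) => a ++
      [(List.range (casos.headD []).length).map (fun x => if x < caso.length then
          ((List.filter (fun i => decide (i + numEstSig < ((pyTranspose matriz).length : Int)))
                ((List.foldl (fun (d : PySem.Dict (List Int) (List Int)) p => d.modify p.2 [] (· ++ [p.1]))
                      PySem.Dict.empty (PySem.List.enumerate (pyTranspose matriz))).getD caso [])).length : Int)
        else 0)])]
  rw [PySem.List.foldl_append_singleton_eq_map, PySem.List.foldl_append_singleton_eq_map]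
  refine Prod.ext ?_ ?_ <;> simp only [List.nil_append]
  · apply List.map_congr_left
    intro caso hc
    rw [pv_pos_eq]
    exact pv_rowK_eq _ _ _ _
  · apply List.map_congr_left
    intro caso hc
    rw [pv_pos_eq]
    simp [pvCrowB]

-- pointwise values of A's coincidence-row computation
theorem pv_stepC_getElem? (lastm : Bool) (k y : Nat) (acc : List Int) :
    (pvStepC lastm acc k)[y]? =
      if k = y then acc[y]?.map (· + (if lastm then (2 : Int) else 1)) else acc[y]? := by
  unfold pvStepC
  cases hl : lastm
  · simp only [Bool.false_eq_true, if_false, List.getElem?_modify]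
    by_cases hky : k = y <;> simp [hky]
  · simp only [if_true, pv_modify_modify, List.getElem?_modify]
    by_cases hky : k = y <;> simp [hky]
    cases acc[y]? <;> simp <;> ring

theorem pv_stepC_fold_getElem? (lastm : Bool) (k : Nat) (r : List Int) (y : Nat) :
    ((List.range k).foldl (pvStepC lastm) r)[y]? =
      if y < k then r[y]?.map (· + (if lastm then (2 : Int) else 1)) else r[y]? := by
  induction k with
  | zero => simp
  | succ k ih =>
    rw [List.range_succ, List.foldl_append, List.foldl_cons, List.foldl_nil]
    rw [pv_stepC_getElem?, ih]
    by_cases hky : k = y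
    · subst hky
      simp [Nat.lt_succ_self]
    · by_cases hyk : y < k
      · simp [hky, hyk, Nat.lt_succ_of_lt hyk]
      · simp [hky, hyk, show ¬ y < k + 1 by omega]

theorem pv_iterC_getElem? {β : Type} (N : List β) (lastm : Bool) (k : Nat) (r : List Int) (y : Nat) :
    (N.foldl (fun r _ => (List.range k).foldl (pvStepC lastm) r) r)[y]? =
      if y < k then r[y]?.map (· + (N.length : Int) * (if lastm then 2 else 1)) else r[y]? := by
  induction N generalizing r with
  | nil => simp
  | cons b N ih =>
    rw [List.foldl_cons, ih, pv_stepC_fold_getElem?]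
    by_cases hy : y < k
    · simp only [hy, if_true]
      cases hr : r[y]? <;> cases hl : lastm <;> simp [hl] <;> push_cast <;> ring
    · simp [hy]

-- A's coincidence row as an iterated fold over the matching positions
theorem pv_rowC_iter (transp : List (List Int)) (num : Int) (caso : List Int) (r : List Int) :
    pvRowC transp num caso r =
      (pvPos transp num caso).foldl
        (fun r _ => (List.range caso.length).foldl
          (pvStepC (PySem.List.pyGetD transp (-1) [] == caso)) r) r := by
  unfold pvRowC pvPos
  rw [List.foldl_filter]

-- outside D_, B's directly-filled coincidence row equals A's incremented one
theorem pv_rowC_agree (transp : List (List Int)) (num : Int) (caso : List Int) (W : Nat)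
    (h : caso = [] ∨ PySem.List.pyGetD transp (-1) [] ≠ caso ∨ pvPos transp num caso = []) :
    pvCrowB transp num caso W = pvRowC transp num caso (List.replicate W (0 : Int)) := by
  rw [pv_rowC_iter]
  unfold pvCrowB
  apply List.ext_getElem?
  intro y
  rw [pv_iterC_getElem?]
  rcases Nat.lt_or_ge y W with hw | hw
  · by_cases hy : y < caso.length
    · rcases h with h | h | h
      · simp [h] at hy
      · simp [h, hy, hw]
      · simp [h, hy, hw]
    · simp [hy, hw]
  · have hnone : (List.replicate W (0 : Int))[y]? = none :=
      List.getElem?_eq_none (by simpa using hw)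
    have hnone2 : ((List.range W).map (fun x => if x < caso.length then ((pvPos transp num caso).length : Int) else 0))[y]? = none :=
      List.getElem?_eq_none (by simpa using hw)
    simp [hnone, hnone2]

-- pvPos is nonempty exactly when D_'s matching-position existential holds
theorem pv_pos_ne_nil_iff (transp : List (List Int)) (num : Int) (caso : List Int) :
    pvPos transp num caso ≠ [] ↔
      ∃ i ∈ List.range transp.length, transp.getD i [] = caso ∧ (i : Int) + num < (transp.length : Int) := by
  unfold pvPos pvGuard
  rw [ne_eq, List.filter_eq_nil_iff]
  push_neg
  constructor
  · rintro ⟨i, hi, hg⟩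
    obtain ⟨h1, h2⟩ := (Bool.and_eq_true _ _).mp hg
    exact ⟨i, hi, by simpa [PySem.List.pyGetD_natCast] using (beq_iff_eq.mp h1), of_decide_eq_true h2⟩
  · rintro ⟨i, hi, hgd, hlt⟩
    refine ⟨i, hi, (Bool.and_eq_true _ _).mpr ⟨beq_iff_eq.mpr ?_, decide_eq_true hlt⟩⟩
    simpa [PySem.List.pyGetD_natCast] using hgd

-- bridge: the recursive transpose's length and columns are the closed-form shape values
theorem pv_minlen_le (m : List (List Int)) (r : List Int) (hr : r ∈ m) :
    pvMinLen m ≤ r.length := by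
  unfold pvMinLen
  have : r.length ∈ m.map List.length := List.mem_map_of_mem hr
  generalize (m.headD []).length = a at *
  induction m with
  | nil => simp at hr
  | cons y ys ih =>
    rcases List.mem_cons.mp hr with h | h
    · subst h; exact min_le_left _ _
    · exact le_trans (min_le_right _ _) (ih h (List.mem_map_of_mem h))

theorem pv_minlen_le_head (m : List (List Int)) : pvMinLen m ≤ (m.headD []).length := by
  unfold pvMinLen
  generalize (m.headD []).length = a
  induction m with
  | nil => exact le_rfl
  | cons x xs ih => exact le_trans (min_le_right _ _) ih

theorem pv_minlen_tail (m : List (List Int)) (hm : m ≠ []) (hne : ¬ m.any List.isEmpty = true) :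
    pvMinLen (m.map List.tail) = pvMinLen m - 1 := by
  unfold pvMinLen
  have hhead : (m.map List.tail).headD [] = (m.headD []).tail := by
    cases m with
    | nil => simp at hm
    | cons r rs => simp
  rw [hhead]
  have hlen : ((m.headD []).tail).length = (m.headD []).length - 1 := by
    simp
  rw [hlen]
  have : ∀ (mm : List (List Int)) (a : Nat),
      (mm.map List.tail).foldr (fun r t => min r.length t) (a - 1) =
        mm.foldr (fun r t => min r.length t) a - 1 := by
    intro mm
    induction mm with
    | nil => intro a; rfl
    | cons r rs ih =>
      intro a
      simp only [List.map_cons, List.foldr_cons, ih, List.length_tail]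
      omega
  exact this m _

theorem pv_minlen_pos (m : List (List Int)) (hm : m ≠ []) (hne : ¬ m.any List.isEmpty = true) :
    0 < pvMinLen m := by
  have hall : ∀ r ∈ m, r ≠ [] := by
    intro r hr hcon
    exact hne (List.any_eq_true.mpr ⟨r, hr, by simp [hcon]⟩)
  have hhead : (m.headD []) ∈ m := by
    cases m with
    | nil => simp at hm
    | cons r rs => simp
  have hinit : 0 < (m.headD []).length := List.length_pos_iff.mpr (hall _ hhead)
  unfold pvMinLen
  have : ∀ (mm : List (List Int)) (a : Nat), 0 < a → (∀ r ∈ mm, r ≠ []) →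
      0 < mm.foldr (fun r t => min r.length t) a := by
    intro mm
    induction mm with
    | nil => intro a ha _; exact ha
    | cons r rs ih =>
      intro a ha hall2
      simp only [List.foldr_cons]
      have h1 : 0 < r.length := List.length_pos_iff.mpr (hall2 r (by simp))
      have h2 := ih a ha (fun r hr => hall2 r (by simp [hr]))
      omega
  exact this m _ hinit hall

theorem pv_minlen_zero_of_empty (m : List (List Int)) (hm : m.any List.isEmpty = true) :
    pvMinLen m = 0 := by
  obtain ⟨r, hr, he⟩ := List.any_eq_true.mp hm
  have : r.length = 0 := by simpa [List.isEmpty_iff] using he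
  have := pv_minlen_le m r hr
  omega

theorem pv_go_length (fuel : Nat) (m : List (List Int))
    (hinv : m ≠ [] → (m.headD []).length = fuel) :
    (pyTransposeGo fuel m).length = pvMinLen m := by
  induction fuel generalizing m with
  | zero =>
    by_cases hm : m = []
    · subst hm; simp [pyTransposeGo, pvMinLen]
    · have h0 := hinv hm
      have := pv_minlen_le_head m
      simp only [pyTransposeGo, List.length_nil]
      omega
  | succ fuel ih =>
    by_cases hm : m = []
    · subst hm; simp [pyTransposeGo, pvMinLen]
    · by_cases he : m.any List.isEmpty = true
      · simp [pyTransposeGo, hm, he, pv_minlen_zero_of_empty m he]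
      · simp only [pyTransposeGo, hm, he, Bool.false_eq_true, if_false, List.length_cons]
        have hinv' : m.map List.tail ≠ [] → ((m.map List.tail).headD []).length = fuel := by
          intro _
          have hhead : (m.map List.tail).headD [] = (m.headD []).tail := by
            cases m with
            | nil => simp at hm
            | cons r rs => simp
          rw [hhead]
          have := hinv hm
          simp only [List.length_tail]
          omega
        rw [ih _ hinv', pv_minlen_tail m hm he]
        have := pv_minlen_pos m hm he
        omega

theorem pv_transpose_length (m : List (List Int)) :
    (pyTranspose m).length = pvMinLen m := by
  unfold pyTranspose
  exact pv_go_length _ m (fun _ => rfl)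

theorem pv_go_getD (fuel : Nat) (m : List (List Int))
    (hinv : m ≠ [] → (m.headD []).length = fuel) :
    ∀ i < pvMinLen m, (pyTransposeGo fuel m).getD i [] = pvCol m i := by
  induction fuel generalizing m with
  | zero =>
    intro i hi
    by_cases hm : m = []
    · subst hm
      have h0 : pvMinLen ([] : List (List Int)) = 0 := rfl
      omega
    · have h0 := hinv hm
      have := pv_minlen_le_head m
      omega
  | succ fuel ih =>
    intro i hi
    by_cases hm : m = []
    · subst hm
      have h0 : pvMinLen ([] : List (List Int)) = 0 := rfl
      omega
    · by_cases he : m.any List.isEmpty = true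
      · rw [pv_minlen_zero_of_empty m he] at hi; omega
      · have hall : ∀ r ∈ m, r ≠ [] := by
          intro r hr hcon
          exact he (List.any_eq_true.mpr ⟨r, hr, by simp [hcon]⟩)
        simp only [pyTransposeGo, hm, he, Bool.false_eq_true, if_false]
        cases i with
        | zero =>
          simp only [List.getD_cons_zero, pvCol]
          apply List.map_congr_left
          intro r hr
          cases hr2 : r with
          | nil => exact absurd hr2 (hall r hr)
          | cons a as => simp
        | succ i =>
          simp only [List.getD_cons_succ]
          have hinv' : m.map List.tail ≠ [] → ((m.map List.tail).headD []).length = fuel := by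
            intro _
            have hhead : (m.map List.tail).headD [] = (m.headD []).tail := by
              cases m with
              | nil => simp at hm
              | cons r rs => simp
            rw [hhead]
            have := hinv hm
            simp only [List.length_tail]
            omega
          have hi' : i < pvMinLen (m.map List.tail) := by
            rw [pv_minlen_tail m hm he]; omega
          rw [ih _ hinv' i hi']
          unfold pvCol
          rw [List.map_map]
          apply List.map_congr_left
          intro r hr
          cases hr2 : r with
          | nil => exact absurd hr2 (hall r hr)
          | cons a as => simp

theorem pv_transpose_getD (m : List (List Int)) (i : Nat) (hi : i < pvMinLen m) :
    (pyTranspose m).getD i [] = pvCol m i := by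
  unfold pyTranspose
  exact pv_go_getD _ m (fun _ => rfl) i hi

theorem pv_transpose_last (m : List (List Int)) (h : 0 < pvMinLen m) :
    PySem.List.pyGetD (pyTranspose m) (-1) [] = pvCol m (pvMinLen m - 1) := by
  have hlen := pv_transpose_length m
  have hne : pyTranspose m ≠ [] := by
    intro hcon
    rw [hcon] at hlen
    simp at hlen
    omega
  rw [PySem.List.pyGetD_neg_one _ _ hne, List.getLast_eq_getElem]
  rw [← pv_transpose_getD m (pvMinLen m - 1) (by omega)]
  rw [List.getD_eq_getElem _ _ (by omega)]
  congr 1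
  omega

theorem pv_transpose_last_nil (m : List (List Int)) (h : pvMinLen m = 0) :
    PySem.List.pyGetD (pyTranspose m) (-1) [] = [] := by
  have hlen := pv_transpose_length m
  have : pyTranspose m = [] := by
    rw [h] at hlen
    exact List.length_eq_zero_iff.mp hlen
  rw [this]
  simp [PySem.List.pyGetD, PySem.List.pyGet?, PySem.List.pyIdx?]

-- ===== VERDICT (by name: the statements are the Claim_ definitions above) =====
theorem EstadoCanalFuturo_spec : Claim_unchanged_EstadoCanalFuturo := by
  intro matriz numEstSig casos _hdom _hpre
  unfold Spec_EstadoCanalFuturo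
  intro hND
  rw [pv_A_eq, pv_B_eq]
  refine Prod.ext rfl ?_
  simp only
  apply List.map_congr_left
  intro caso hc
  refine (pv_rowC_agree _ _ _ _ ?_).symm
  by_cases h1 : caso = []
  · exact Or.inl h1
  by_cases h2 : PySem.List.pyGetD (pyTranspose matriz) (-1) [] = caso
  · refine Or.inr (Or.inr ?_)
    by_contra h3
    obtain ⟨i, hi, hgd, hlt⟩ := (pv_pos_ne_nil_iff _ _ _).mp h3
    rw [pv_transpose_length] at hi hlt
    have hT : 0 < pvMinLen matriz := by
      by_contra hT0
      rw [pv_transpose_last_nil matriz (by omega)] at h2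
      exact h1 h2.symm
    refine hND ⟨caso, hc, h1, hT, ?_, i, hi, ?_, hlt⟩
    · rw [← pv_transpose_last matriz hT]
      exact h2
    · rw [← pv_transpose_getD matriz i (by simpa using hi)]
      exact hgd
  · exact Or.inr (Or.inl h2)

theorem EstadoCanalFuturo_changed : Claim_changed_EstadoCanalFuturo := by
  unfold Claim_changed_EstadoCanalFuturo; decide

theorem EstadoCanalFuturo_tight : Claim_exact_EstadoCanalFuturo := by
  intro matriz numEstSig casos _hdom hpre hD heq
  obtain ⟨caso, hc, hne, hT, hlastcol, i, hi, hcol, hlt⟩ := hD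
  have hgd : (pyTranspose matriz).getD i [] = caso := by
    rw [pv_transpose_getD matriz i (by simpa using hi)]
    exact hcol
  have hlast : PySem.List.pyGetD (pyTranspose matriz) (-1) [] = caso := by
    rw [pv_transpose_last matriz hT]
    exact hlastcol
  have hpos : pvPos (pyTranspose matriz) numEstSig caso ≠ [] :=
    (pv_pos_ne_nil_iff _ numEstSig caso).mpr
      ⟨i, by rw [pv_transpose_length]; exact hi, hgd, by rw [pv_transpose_length]; exact hlt⟩
  have hN : 0 < (pvPos (pyTranspose matriz) numEstSig caso).length :=
    List.length_pos_iff.mpr hpos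
  have hWk : caso.length ≤ (casos.headD []).length := by
    have := hpre caso hc i hi hcol hlt
    exact this.1
  have hk : 0 < caso.length := List.length_pos_iff.mpr hne
  have hW0 : 0 < (casos.headD []).length := lt_of_lt_of_le hk hWk
  obtain ⟨j, hj, hje⟩ := List.getElem_of_mem hc
  have heq2 := congrArg Prod.snd heq
  rw [pv_A_eq, pv_B_eq] at heq2
  simp only at heq2
  have hrow : pvRowC (pyTranspose matriz) numEstSig caso (List.replicate (casos.headD []).length (0 : Int)) =
      pvCrowB (pyTranspose matriz) numEstSig caso (casos.headD []).length := by
    have h1 := congrArg (fun l => l[j]?) heq2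
    simpa [List.getElem?_map, List.getElem?_eq_getElem hj, hje] using h1
  have h0 := congrArg (fun l => l[0]?) hrow
  rw [pv_rowC_iter] at h0
  simp only [pvCrowB] at h0
  rw [pv_iterC_getElem?] at h0
  have hlb : (PySem.List.pyGetD (pyTranspose matriz) (-1) [] == caso) = true := beq_iff_eq.mpr hlast
  simp only [hk, if_true, hlb, List.getElem?_replicate, hW0, List.getElem?_map,
    List.getElem?_range, Option.map_some, Option.some.injEq] at h0
  have hNi : (1 : Int) ≤ ((pvPos (pyTranspose matriz) numEstSig caso).length : Int) := by exact_mod_cast hN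
  omega
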